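-- pv_equiv track=rewrite | github.com/jcraig949jfi/Prometheus | agents/hephaestus/forge/logical_consistency_checker.py | _check_transitivity
-- ===== SOURCE A (Python) =====
-- from collections import defaultdict
--
-- def _check_transitivity(facts: list[tuple]) -> tuple[int, int]:
--     """Check transitive consistency. Returns (satisfied, violated)."""
--     # Build ordering graph
--     greater = defaultdict(set)  # a > b
--     for fact in facts:
--         if len(fact) == 3 and fact[1] == ">":
--             greater[fact[0]].add(fact[2])
--         elif len(fact) == 3 and fact[1] == "<":
--             greater[fact[2]].add(fact[0])
--
--     satisfied = 0
--     violated = 0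
--
--     # Check: if a > b and b > c, then a > c should hold (or not a < c)
--     for a in greater:
--         for b in greater[a]:
--             for c in greater.get(b, set()):
--                 # a > b > c, so a > c
--                 if c in greater.get(a, set()):
--                     satisfied += 1
--                 elif a in greater.get(c, set()):
--                     violated += 1  # contradiction: a > c and c > a
--                 else:
--                     satisfied += 1  # no contradiction, just missing
--
--     return satisfied, violated
-- ===== SOURCE B (Python) =====
-- def _check_transitivity(facts: list[tuple]) -> tuple[int, int]:
--     """Degree-product closed form for the 2-path total; count only violations and subtract."""
--     greater = {}
--     for fact in facts:
--         if len(fact) == 3 and fact[1] == ">":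
--             greater.setdefault(fact[0], set()).add(fact[2])
--         elif len(fact) == 3 and fact[1] == "<":
--             greater.setdefault(fact[2], set()).add(fact[0])
--
--     # total number of 2-paths a > b > c  =  sum over b of indeg(b) * outdeg(b)
--     indeg = {}
--     for s in greater.values():
--         for b in s:
--             indeg[b] = indeg.get(b, 0) + 1
--     total = sum(cnt * len(greater.get(b, ())) for b, cnt in indeg.items())
--
--     violated = 0
--     for a, sa in greater.items():
--         for b in sa:
--             for c in greater.get(b, ()):
--                 if a in greater.get(c, ()) and c not in greater.get(a, ()):
--                     violated += 1
--
--     return total - violated, violated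
-- ===== Notes on version B (the rewrite author's own statement) =====
-- stated objective: alternative
-- what changed: B replaces A's per-triple satisfied/violated branch accumulation by a closed-form total of 2-paths (sum of indeg(b)*outdeg(b) computed in one pass over the adjacency sets) and a loop that counts only violations, returning (total - violated, violated).
import Mathlib
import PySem

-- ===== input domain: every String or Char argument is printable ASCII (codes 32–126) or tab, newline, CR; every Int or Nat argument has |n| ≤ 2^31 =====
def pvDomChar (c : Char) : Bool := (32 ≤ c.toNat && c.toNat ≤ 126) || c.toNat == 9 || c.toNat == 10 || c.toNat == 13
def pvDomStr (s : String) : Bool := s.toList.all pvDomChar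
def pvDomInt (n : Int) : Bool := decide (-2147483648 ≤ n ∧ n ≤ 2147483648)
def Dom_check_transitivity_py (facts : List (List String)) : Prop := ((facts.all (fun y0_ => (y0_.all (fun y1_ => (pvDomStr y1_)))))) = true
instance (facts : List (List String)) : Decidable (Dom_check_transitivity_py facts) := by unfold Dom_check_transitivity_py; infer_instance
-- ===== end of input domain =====

-- B replaces A's per-triple satisfied/violated branch accumulation by a closed-form degree-product
-- total of 2-paths minus a violation-only count (alternative decomposition, same cost).

-- ===== PORT A =====
-- defaultdict(set): greater[k].add(v) is 'modify k with default ∅, then add'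
def pvBuildA (facts : List (List String)) : PySem.Dict String (PySem.Set String) :=
  facts.foldl (fun g fact =>
    match fact with
    | [x, op, y] =>
      if op = ">" then g.modify x [] (fun s => PySem.Set.add s y)
      else if op = "<" then g.modify y [] (fun s => PySem.Set.add s x)
      else g
    | _ => g) PySem.Dict.empty

def check_transitivity_py (facts : List (List String)) : Int × Int :=
  let g := pvBuildA facts
  g.items.foldl (fun sv p =>
    p.2.foldl (fun sv b =>
      (g.getD b []).foldl (fun (sv : Int × Int) c =>
        if c ∈ g.getD p.1 [] then (sv.1 + 1, sv.2)
        else if p.1 ∈ g.getD c [] then (sv.1, sv.2 + 1)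
        else (sv.1 + 1, sv.2)) sv) sv) ((0 : Int), (0 : Int))

-- ===== PORT B =====
-- plain dict with setdefault(...).add(...)
def pvBuildB (facts : List (List String)) : PySem.Dict String (PySem.Set String) :=
  facts.foldl (fun g fact =>
    match fact with
    | [x, op, y] =>
      if op = ">" then g.insert x (PySem.Set.add (g.getD x []) y)
      else if op = "<" then g.insert y (PySem.Set.add (g.getD y []) x)
      else g
    | _ => g) PySem.Dict.empty

def check_transitivity_py_alt (facts : List (List String)) : Int × Int :=
  let g := pvBuildB facts
  let indeg : PySem.Dict String Int :=
    g.values.foldl (fun d s =>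
      s.foldl (fun (d : PySem.Dict String Int) b => d.insert b (d.getD b 0 + 1)) d)
      PySem.Dict.empty
  let total : Int :=
    indeg.items.foldl (fun acc p => acc + p.2 * ((g.getD p.1 []).length : Int)) 0
  let violated : Int :=
    g.items.foldl (fun v p =>
      p.2.foldl (fun v b =>
        (g.getD b []).foldl (fun (v : Int) c =>
          if p.1 ∈ g.getD c [] ∧ c ∉ g.getD p.1 [] then v + 1 else v) v) v) 0
  (total - violated, violated)

-- ===== PRECONDITION & SPEC =====
def Spec_check_transitivity_py (facts : List (List String)) (out : Int × Int) : Prop := out = check_transitivity_py_alt facts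
instance (facts : List (List String)) (out : Int × Int) : Decidable (Spec_check_transitivity_py facts out) := by unfold Spec_check_transitivity_py; infer_instance

-- ===== CLAIM (what is proved, stated in full; the proofs are below) =====
def Claim_equal_check_transitivity_py : Prop := ∀ (facts : List (List String)), Dom_check_transitivity_py facts → Spec_check_transitivity_py facts (check_transitivity_py facts)

-- ===== LEMMAS AND PROOFS =====

-- indicator of a violated 2-path a > b > c (the condition both programs test)
def pvViol (g : PySem.Dict String (PySem.Set String)) (a c : String) : Int :=
  if a ∈ g.getD c [] ∧ c ∉ g.getD a [] then 1 else 0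

def pvVi (g : PySem.Dict String (PySem.Set String)) (a : String) (L : List String) : Int :=
  (L.map (pvViol g a)).sum

def pvW (g : PySem.Dict String (PySem.Set String)) (p : String × PySem.Set String) : Int :=
  (p.2.map (fun b => pvVi g p.1 (g.getD b []))).sum

def pvN (g : PySem.Dict String (PySem.Set String)) (p : String × PySem.Set String) : Int :=
  (p.2.map (fun b => ((g.getD b ([] : PySem.Set String)).length : Int))).sum

-- ----- A's triple loop -----
theorem pvA1 (g : PySem.Dict String (PySem.Set String)) (a : String) :
    ∀ (L : List String) (s v : Int),
      L.foldl (fun (sv : Int × Int) c =>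
        if c ∈ g.getD a [] then (sv.1 + 1, sv.2)
        else if a ∈ g.getD c [] then (sv.1, sv.2 + 1)
        else (sv.1 + 1, sv.2)) (s, v)
      = (s + ((L.length : Int) - pvVi g a L), v + pvVi g a L) := by
  intro L
  induction L with
  | nil => intro s v; simp [pvVi]
  | cons c L ih =>
    intro s v
    simp only [List.foldl_cons]
    by_cases h1 : c ∈ g.getD a []
    · simp only [if_pos h1, ih]
      have hv : pvViol g a c = 0 := by simp [pvViol, h1]
      simp only [pvVi, List.map_cons, List.sum_cons, hv, List.length_cons]
      simp only [Prod.mk.injEq]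
      constructor <;> (push_cast; ring)
    · by_cases h2 : a ∈ g.getD c []
      · simp only [if_neg h1, if_pos h2, ih]
        have hv : pvViol g a c = 1 := by simp [pvViol, h1, h2]
        simp only [pvVi, List.map_cons, List.sum_cons, hv, List.length_cons]
        simp only [Prod.mk.injEq]
        constructor <;> (push_cast; ring)
      · simp only [if_neg h1, if_neg h2, ih]
        have hv : pvViol g a c = 0 := by simp [pvViol, h2]
        simp only [pvVi, List.map_cons, List.sum_cons, hv, List.length_cons]
        simp only [Prod.mk.injEq]
        constructor <;> (push_cast; ring)

theorem pvA2 (g : PySem.Dict String (PySem.Set String)) (a : String) :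
    ∀ (sa : List String) (s v : Int),
      sa.foldl (fun sv b =>
        (g.getD b []).foldl (fun (sv : Int × Int) c =>
          if c ∈ g.getD a [] then (sv.1 + 1, sv.2)
          else if a ∈ g.getD c [] then (sv.1, sv.2 + 1)
          else (sv.1 + 1, sv.2)) sv) (s, v)
      = (s + (pvN g (a, sa) - pvW g (a, sa)), v + pvW g (a, sa)) := by
  intro sa
  induction sa with
  | nil => intro s v; simp [pvN, pvW]
  | cons b sa ih =>
    intro s v
    simp only [List.foldl_cons, pvA1 g a (g.getD b []) s v, ih]
    simp only [pvN, pvW, List.map_cons, List.sum_cons]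
    simp only [Prod.mk.injEq]
    refine ⟨by ring, by ring⟩

theorem pvA3 (g : PySem.Dict String (PySem.Set String)) :
    ∀ (ps : List (String × PySem.Set String)) (s v : Int),
      ps.foldl (fun sv p =>
        p.2.foldl (fun sv b =>
          (g.getD b []).foldl (fun (sv : Int × Int) c =>
            if c ∈ g.getD p.1 [] then (sv.1 + 1, sv.2)
            else if p.1 ∈ g.getD c [] then (sv.1, sv.2 + 1)
            else (sv.1 + 1, sv.2)) sv) sv) (s, v)
      = (s + ((ps.map (pvN g)).sum - (ps.map (pvW g)).sum), v + (ps.map (pvW g)).sum) := by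
  intro ps
  induction ps with
  | nil => intro s v; simp
  | cons p ps ih =>
    intro s v
    simp only [List.foldl_cons, pvA2 g p.1 p.2 s v, ih]
    simp only [List.map_cons, List.sum_cons]
    simp only [Prod.mk.injEq]
    refine ⟨by ring, by ring⟩

-- ----- B's violation loop -----
theorem pvB1 (g : PySem.Dict String (PySem.Set String)) (a : String) :
    ∀ (L : List String) (v : Int),
      L.foldl (fun (v : Int) c =>
        if a ∈ g.getD c [] ∧ c ∉ g.getD a [] then v + 1 else v) v
      = v + pvVi g a L := by
  intro L
  induction L with
  | nil => intro v; simp [pvVi]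
  | cons c L ih =>
    intro v
    simp only [List.foldl_cons, ih, pvVi, List.map_cons, List.sum_cons, pvViol]
    split_ifs <;> ring

theorem pvB2 (g : PySem.Dict String (PySem.Set String)) (a : String) :
    ∀ (sa : List String) (v : Int),
      sa.foldl (fun v b =>
        (g.getD b []).foldl (fun (v : Int) c =>
          if a ∈ g.getD c [] ∧ c ∉ g.getD a [] then v + 1 else v) v) v
      = v + pvW g (a, sa) := by
  intro sa
  induction sa with
  | nil => intro v; simp [pvW]
  | cons b sa ih =>
    intro v
    simp only [List.foldl_cons, pvB1 g a (g.getD b []) v, ih]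
    simp only [pvW, List.map_cons, List.sum_cons]
    ring

theorem pvB3 (g : PySem.Dict String (PySem.Set String)) :
    ∀ (ps : List (String × PySem.Set String)) (v : Int),
      ps.foldl (fun v p =>
        p.2.foldl (fun v b =>
          (g.getD b []).foldl (fun (v : Int) c =>
            if p.1 ∈ g.getD c [] ∧ c ∉ g.getD p.1 [] then v + 1 else v) v) v) v
      = v + (ps.map (pvW g)).sum := by
  intro ps
  induction ps with
  | nil => intro v; simp
  | cons p ps ih =>
    intro v
    simp only [List.foldl_cons, pvB2 g p.1 p.2 v, ih, List.map_cons, List.sum_cons]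
    ring

-- ----- the degree-product total -----
theorem pvFlat (ins : PySem.Dict String Int → String → PySem.Dict String Int) :
    ∀ (ss : List (PySem.Set String)) (d : PySem.Dict String Int),
      ss.foldl (fun d s => s.foldl ins d) d = (ss.flatMap id).foldl ins d := by
  intro ss
  induction ss with
  | nil => intro d; simp
  | cons s ss ih => intro d; simp only [List.foldl_cons, List.flatMap_cons, id, List.foldl_append, ih]

-- split one element's contribution off a sum over any list
theorem pvSplit (x : String) :
    ∀ (m : List String) (h : String → Int),
      (m.map h).sum
      = ((m.filter (fun y => !(y == x))).map h).sum + (m.count x : Int) * h x := by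
  intro m
  induction m with
  | nil => intro h; simp
  | cons y m ih =>
    intro h
    by_cases hy : y = x
    · subst hy
      have hf : List.filter (fun z => !(z == y)) (y :: m)
          = m.filter (fun z => !(z == y)) := by simp
      rw [List.map_cons, List.sum_cons, hf, List.count_cons_self, ih h]
      push_cast; ring
    · have hf : List.filter (fun z => !(z == x)) (y :: m)
          = y :: m.filter (fun z => !(z == x)) := by simp [hy]
      have hc : (y :: m).count x = m.count x := by
        simp [hy]
      rw [List.map_cons, List.sum_cons, hf, List.map_cons, List.sum_cons, hc, ih h]
      ring

theorem pvCsum : ∀ (L : List String) (f : String → Int),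
    ((PySem.Set.ofList L).map (fun k => (L.count k : Int) * f k)).sum = (L.map f).sum := by
  intro L
  induction L with
  | nil => intro f; simp [PySem.Set.ofList_nil]
  | cons x L ih =>
    intro f
    rw [PySem.Set.ofList_cons]
    have hdis : PySem.Set.discard (PySem.Set.ofList L) x
        = (PySem.Set.ofList L).filter (fun y => !(y == x)) := rfl
    simp only [List.map_cons, List.sum_cons, hdis]
    -- counts over x :: L
    have hcx : ((x :: L).count x : Int) = (L.count x : Int) + 1 := by
      simp [List.count_cons_self]
    have hmap : ((PySem.Set.ofList L).filter (fun y => !(y == x))).map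
          (fun k => ((x :: L).count k : Int) * f k)
        = ((PySem.Set.ofList L).filter (fun y => !(y == x))).map
          (fun k => (L.count k : Int) * f k) := by
      apply List.map_congr_left
      intro k hk
      have hkx : k ≠ x := by
        have := List.of_mem_filter hk
        simpa using this
      simp [Ne.symm hkx]
    rw [hmap]
    have hsplit := pvSplit x (PySem.Set.ofList L) (fun k => (L.count k : Int) * f k)
    have hcount : ((PySem.Set.ofList L).count x : Int) * ((L.count x : Int) * f x)
        = (L.count x : Int) * f x ∨
        ((PySem.Set.ofList L).count x : Int) = 0 ∧ (L.count x : Int) = 0 := by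
      by_cases hx : x ∈ L
      · left
        have hx' : x ∈ PySem.Set.ofList L := by
          rw [PySem.Set.mem_ofList]; exact hx
        have h1 : (PySem.Set.ofList L).count x = 1 :=
          List.count_eq_one_of_mem (PySem.Set.nodup_ofList L) hx'
        rw [h1]; push_cast; ring
      · right
        constructor
        · have : x ∉ PySem.Set.ofList L := by rw [PySem.Set.mem_ofList]; exact hx
          simp [List.count_eq_zero_of_not_mem this]
        · simp [List.count_eq_zero_of_not_mem hx]
    rw [← ih f] at *
    rw [hsplit] at *
    simp only [hcx]
    rcases hcount with h | ⟨h1, h2⟩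
    · rw [h] at *; ring
    · rw [h1, h2] at *; ring

-- ===== VERDICT (by name: the statement is the Claim_ definition above) =====
theorem check_transitivity_py_spec : Claim_equal_check_transitivity_py := by
  intro facts _
  unfold Spec_check_transitivity_py check_transitivity_py check_transitivity_py_alt
  have hb : pvBuildB facts = pvBuildA facts := rfl
  rw [hb]
  set g := pvBuildA facts with hg
  simp only []
  -- A's side
  rw [pvA3 g g.items 0 0]
  -- B's violation loop
  rw [pvB3 g g.items 0]
  -- B's indeg is a counter over the flattened values
  rw [pvFlat _ g.values PySem.Dict.empty]
  rw [PySem.Dict.foldl_insert_getD_add_one_eq_counter]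
  rw [PySem.List.foldl_add]
  rw [PySem.Dict.items_counter]
  rw [List.map_map]
  have hcomp :
      ((fun p : String × Int => p.2 * ((g.getD p.1 []).length : Int)) ∘
        (fun k => (k, ((g.values.flatMap id).count k : Int))))
      = fun k => ((g.values.flatMap id).count k : Int) * ((g.getD k []).length : Int) := by
    funext k; rfl
  rw [hcomp, pvCsum (g.values.flatMap id) (fun k => ((g.getD k []).length : Int))]
  have hvals : g.values = g.items.map (·.2) := rfl
  have hflat : ((g.values.flatMap id).map (fun k => ((g.getD k []).length : Int))).sum
      = (g.items.map (pvN g)).sum := by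
    rw [hvals]
    simp only [List.flatMap_id, List.map_flatten, List.sum_flatten, List.map_map]
    congr 1
  rw [hflat]
  simp only [Prod.mk.injEq]
  constructor
  · ring
  · trivial
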